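-- pv_equiv track=rewrite | github.com/dll-ncai/WAVESAGE | WAVESAGE/SHAP/Shap_single_process.py | build_coeff_slices_from_coeffs
-- ===== SOURCE A (Python) =====
-- def build_coeff_slices_from_coeffs(coeffs):
--     """Build index ranges for each wavelet coefficient array."""
--     slices = {}
--     start = 0
--     for i, c in enumerate(coeffs):
--         end = start + len(c)
--         slices[f"Coeff {i}"] = (start, end)
--         start = end
--     return slices
-- ===== SOURCE B (Python) =====
-- def build_coeff_slices_from_coeffs(coeffs):
--     """Build index ranges for each wavelet coefficient array.
--
--     Prefix-sum decomposition: compute all cumulative boundaries first,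
--     then pair consecutive boundaries instead of threading a running start.
--     """
--     lengths = [len(c) for c in coeffs]
--     offsets = [0]
--     for n in lengths:
--         offsets.append(offsets[-1] + n)
--     return {f"Coeff {i}": (s, e) for i, (s, e) in enumerate(zip(offsets, offsets[1:]))}
-- ===== Notes on version B (the rewrite author's own statement) =====
-- stated objective: alternative
-- what changed: Replaces the stateful running-start dict loop by a prefix-sum table of cumulative boundaries paired with its own tail (zip of consecutive offsets) and a comprehension over the pairs.
import Mathlib
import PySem

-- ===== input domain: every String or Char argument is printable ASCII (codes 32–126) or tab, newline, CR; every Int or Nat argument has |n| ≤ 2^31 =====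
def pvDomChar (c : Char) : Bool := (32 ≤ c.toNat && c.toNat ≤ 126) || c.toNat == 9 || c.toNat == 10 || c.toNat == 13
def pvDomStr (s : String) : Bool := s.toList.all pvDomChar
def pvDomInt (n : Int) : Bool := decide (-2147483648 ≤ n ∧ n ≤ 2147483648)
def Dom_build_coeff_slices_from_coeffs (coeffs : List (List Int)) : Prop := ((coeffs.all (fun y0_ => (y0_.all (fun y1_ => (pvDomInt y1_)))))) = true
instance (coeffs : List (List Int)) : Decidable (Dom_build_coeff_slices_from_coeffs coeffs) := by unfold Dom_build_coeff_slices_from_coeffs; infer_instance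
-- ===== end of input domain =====

-- B replaces A's stateful running-start dict loop by a prefix-sum table of cumulative
-- boundaries paired with its own tail; same O(n) cost (objective: alternative decomposition).

-- ===== PORT A =====
-- slices = {}; start = 0; for i, c in enumerate(coeffs): end = start+len(c); slices[f"Coeff {i}"] = (start, end); start = end
def build_coeff_slices_from_coeffs (coeffs : List (List Int)) : List (String × Int × Int) :=
  (((PySem.List.enumerate coeffs).foldl
      (fun (st : PySem.Dict String (Int × Int) × Int) ic =>
        let endv : Int := st.2 + (ic.2.length : Int)
        (st.1.insert ("Coeff " ++ PySem.Int.toStr ic.1) (st.2, endv), endv))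
      (PySem.Dict.empty, 0)).1).items

-- ===== PORT B =====
def build_coeff_slices_from_coeffs_alt (coeffs : List (List Int)) : List (String × Int × Int) :=
  let lengths : List Int := coeffs.map (fun c => (c.length : Int))
  -- offsets = [0]; for n in lengths: offsets.append(offsets[-1] + n)
  -- (offsets[-1] ported as getLastD 0: offsets is nonempty throughout, so this is exact)
  let offsets : List Int := lengths.foldl (fun acc n => acc ++ [acc.getLastD 0 + n]) [0]
  -- {f"Coeff {i}": (s, e) for i, (s, e) in enumerate(zip(offsets, offsets[1:]))}  (keys are fresh, dict = list of pairs)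
  (PySem.List.enumerate (offsets.zip (PySem.List.slice offsets (some 1) none))).map
    (fun p => ("Coeff " ++ PySem.Int.toStr p.1, p.2.1, p.2.2))

-- ===== PRECONDITION & SPEC =====
def Spec_build_coeff_slices_from_coeffs (coeffs : List (List Int)) (out : List (String × Int × Int)) : Prop := out = build_coeff_slices_from_coeffs_alt coeffs
instance (coeffs : List (List Int)) (out : List (String × Int × Int)) : Decidable (Spec_build_coeff_slices_from_coeffs coeffs out) := by unfold Spec_build_coeff_slices_from_coeffs; infer_instance

-- ===== CLAIM (what is proved, stated in full; the proofs are below) =====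
def Claim_equal_build_coeff_slices_from_coeffs : Prop := ∀ (coeffs : List (List Int)), Dom_build_coeff_slices_from_coeffs coeffs → Spec_build_coeff_slices_from_coeffs coeffs (build_coeff_slices_from_coeffs coeffs)

-- ===== LEMMAS AND PROOFS =====

-- decimal representation used by Nat.toDigits 10
def pvRep (n : Nat) : List Char :=
  if _h : n < 10 then [Nat.digitChar n] else pvRep (n / 10) ++ [Nat.digitChar (n % 10)]
decreasing_by omega

theorem pvRep_lt {n : Nat} (h : n < 10) : pvRep n = [Nat.digitChar n] := by
  rw [pvRep, dif_pos h]

theorem pvRep_ge {n : Nat} (h : ¬ n < 10) : pvRep n = pvRep (n / 10) ++ [Nat.digitChar (n % 10)] := by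
  rw [pvRep, dif_neg h]

theorem pvDigitChar_inj {a b : Nat} (ha : a < 10) (hb : b < 10) (h : Nat.digitChar a = Nat.digitChar b) : a = b := by
  interval_cases a <;> interval_cases b <;> simp_all [Nat.digitChar]

theorem pvRep_inj : ∀ {m n : Nat}, pvRep m = pvRep n → m = n := by
  intro m
  induction m using Nat.strong_induction_on with
  | _ m ih =>
    intro n h
    by_cases hm : m < 10 <;> by_cases hn : n < 10
    · rw [pvRep_lt hm, pvRep_lt hn] at h
      exact pvDigitChar_inj hm hn (by simpa using h)
    · rw [pvRep_lt hm, pvRep_ge hn] at h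
      have := congrArg List.length h
      have h1 : 1 ≤ (pvRep (n / 10)).length := by
        rw [pvRep]; split <;> simp
      simp only [List.length_append, List.length_cons, List.length_nil] at this; omega
    · rw [pvRep_ge hm, pvRep_lt hn] at h
      have := congrArg List.length h
      have h1 : 1 ≤ (pvRep (m / 10)).length := by
        rw [pvRep]; split <;> simp
      simp only [List.length_append, List.length_cons, List.length_nil] at this; omega
    · rw [pvRep_ge hm, pvRep_ge hn] at h
      have h2 := List.append_inj_right h (by
        have := congrArg List.length h; simp at this; omega)
      have h1 := List.append_inj_left h (by
        have := congrArg List.length h; simp at this; omega)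
      have hdiv : m / 10 = n / 10 := ih (m / 10) (by omega) h1
      have hmod : m % 10 = n % 10 := pvDigitChar_inj (by omega) (by omega) (by simpa using h2)
      omega

theorem pvToDigitsCore_eq : ∀ (f n : Nat) (l : List Char), n < f →
    Nat.toDigitsCore 10 f n l = pvRep n ++ l := by
  intro f
  induction f with
  | zero => intro n l h; omega
  | succ f ih =>
    intro n l h
    by_cases h10 : n < 10
    · have : n / 10 = 0 := by omega
      rw [Nat.toDigitsCore, if_pos this, pvRep_lt h10, Nat.mod_eq_of_lt h10]
      rfl
    · have hne : ¬ n / 10 = 0 := by omega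
      rw [Nat.toDigitsCore, if_neg hne, ih (n / 10) _ (by omega), pvRep_ge h10]
      simp

theorem pvToDigits_eq (n : Nat) : Nat.toDigits 10 n = pvRep n :=
  (pvToDigitsCore_eq (n + 1) n [] (by omega)).trans (by simp)

theorem pvToStr_inj {i j : Int} (hi : 0 ≤ i) (hj : 0 ≤ j) (h : PySem.Int.toStr i = PySem.Int.toStr j) : i = j := by
  have hc : PySem.Int.toChars i = PySem.Int.toChars j := by
    rw [← PySem.Int.toList_toStr, ← PySem.Int.toList_toStr, h]
  rw [PySem.Int.toChars, PySem.Int.toChars, if_neg (by omega), if_neg (by omega),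
      pvToDigits_eq, pvToDigits_eq] at hc
  have := pvRep_inj hc
  omega

theorem pvKey_inj {i j : Int} (hi : 0 ≤ i) (hj : 0 ≤ j)
    (h : ("Coeff " ++ PySem.Int.toStr i : String) = "Coeff " ++ PySem.Int.toStr j) : i = j := by
  apply pvToStr_inj hi hj
  have := congrArg String.toList h
  simp only [String.toList_append] at this
  exact String.ext (List.append_cancel_left this)

-- the common specification list: entry i covers [s, s + len c)
def pvSpecList (i s : Int) : List (List Int) → List (String × Int × Int)
  | [] => []
  | c :: cs => ("Coeff " ++ PySem.Int.toStr i, s, s + (c.length : Int)) :: pvSpecList (i + 1) (s + (c.length : Int)) cs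

-- A's fold over fresh keys appends pvSpecList to the accumulated items
theorem pvFoldA (cs : List (List Int)) : ∀ (i s : Int) (d : PySem.Dict String (Int × Int)),
    0 ≤ i → (∀ k ∈ d.keys, ∀ j : Int, i ≤ j → k ≠ "Coeff " ++ PySem.Int.toStr j) →
    (((PySem.List.enumerate cs i).foldl
      (fun (st : PySem.Dict String (Int × Int) × Int) ic =>
        let endv : Int := st.2 + (ic.2.length : Int)
        (st.1.insert ("Coeff " ++ PySem.Int.toStr ic.1) (st.2, endv), endv))
      (d, s)).1).items = d.items ++ pvSpecList i s cs := by
  induction cs with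
  | nil => intro i s d _ _; simp [PySem.List.enumerate_nil, pvSpecList]
  | cons c cs ih =>
    intro i s d hi hfresh
    rw [PySem.List.enumerate_cons, List.foldl_cons]
    have hnc : d.contains ("Coeff " ++ PySem.Int.toStr i) = false := by
      rw [← Bool.not_eq_true, PySem.Dict.contains_iff_mem_keys]
      intro hmem
      exact hfresh _ hmem i le_rfl rfl
    have hrec := ih (i + 1) (s + (c.length : Int))
      (d.insert ("Coeff " ++ PySem.Int.toStr i) (s, s + (c.length : Int))) (by omega)
      (by
        intro k hk j hj
        rw [PySem.Dict.keys_insert_of_not_contains _ _ hnc, List.mem_append] at hk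
        rcases hk with hk | hk
        · exact hfresh _ hk j (by omega)
        · simp only [List.mem_singleton] at hk
          subst hk
          intro heq
          have := pvKey_inj hi (by omega) heq
          omega)
    simpa [PySem.Dict.items_insert_of_not_contains _ _ hnc, pvSpecList] using hrec

-- B's offsets loop is the prefix-sum list pvOffs
def pvOffs (s : Int) : List Int → List Int
  | [] => []
  | n :: ns => (s + n) :: pvOffs (s + n) ns

theorem pvFoldB (ns : List Int) : ∀ (acc : List Int), acc ≠ [] →
    ns.foldl (fun acc n => acc ++ [acc.getLastD 0 + n]) acc = acc ++ pvOffs (acc.getLastD 0) ns := by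
  induction ns with
  | nil => intro acc _; simp [pvOffs]
  | cons n ns ih =>
    intro acc hne
    rw [List.foldl_cons, ih (acc ++ [acc.getLastD 0 + n]) (by simp)]
    simp [pvOffs]

theorem pvZipSpec (cs : List (List Int)) : ∀ (i s : Int),
    (PySem.List.enumerate ((s :: pvOffs s (cs.map (fun c => (c.length : Int)))).zip
        (pvOffs s (cs.map (fun c => (c.length : Int))))) i).map
      (fun p => ("Coeff " ++ PySem.Int.toStr p.1, p.2.1, p.2.2)) = pvSpecList i s cs := by
  induction cs with
  | nil => intro i s; simp [pvOffs, PySem.List.enumerate_nil, pvSpecList]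
  | cons c cs ih =>
    intro i s
    simp only [List.map_cons, pvOffs, List.zip_cons_cons, PySem.List.enumerate_cons, List.map_cons]
    rw [pvSpecList]
    exact congrArg _ (ih (i + 1) (s + (c.length : Int)))

-- ===== VERDICT (by name: the statement is the Claim_ definition above) =====
theorem build_coeff_slices_from_coeffs_spec : Claim_equal_build_coeff_slices_from_coeffs := by
  intro coeffs _
  unfold Spec_build_coeff_slices_from_coeffs
  unfold build_coeff_slices_from_coeffs build_coeff_slices_from_coeffs_alt
  rw [pvFoldA coeffs 0 0 PySem.Dict.empty le_rfl (by simp [PySem.Dict.keys_empty])]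
  have hoff : (List.map (fun c => ((c.length : Int))) coeffs).foldl
      (fun acc n => acc ++ [acc.getLastD 0 + n]) [0] = 0 :: pvOffs 0 (coeffs.map (fun c => (c.length : Int))) := by
    rw [pvFoldB _ [0] (by simp)]; simp
  simp only [hoff, PySem.List.slice_from_one, List.tail_cons]
  rw [pvZipSpec coeffs 0 0]
  simp [PySem.Dict.empty]
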